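-- pv_equiv track=rewrite | github.com/316060064/Taller-de-herramientas-computacionales | Clases/Programas/Tarea8/Problema7.py | f
-- ===== SOURCE A (Python) =====
-- def f(l):
--     a = 0
--     b = 0
--     for i in l:
--         if i > 0:
--             a += 1
--         else:
--             a -= 1
--     return a + b
-- ===== SOURCE B (Python) =====
-- def f(l):
--     # Sort, then binary-search the boundary between non-positives and positives:
--     # all elements before index lo are <= 0, all from lo on are > 0.
--     s = sorted(l)
--     lo, hi = 0, len(s)
--     while lo < hi:
--         mid = (lo + hi) // 2
--         if s[mid] > 0:
--             hi = mid
--         else: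
--             lo = mid + 1
--     return (len(s) - lo) - lo
-- ===== Notes on version B (the rewrite author's own statement) =====
-- stated objective: alternative
-- what changed: Replaces A's single-pass increment/decrement accumulator by sorting the list and binary-searching the boundary index between non-positives and positives, returning positives-minus-nonpositives from that index; trades O(n) scanning for O(n log n) sorting.
import Mathlib
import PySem

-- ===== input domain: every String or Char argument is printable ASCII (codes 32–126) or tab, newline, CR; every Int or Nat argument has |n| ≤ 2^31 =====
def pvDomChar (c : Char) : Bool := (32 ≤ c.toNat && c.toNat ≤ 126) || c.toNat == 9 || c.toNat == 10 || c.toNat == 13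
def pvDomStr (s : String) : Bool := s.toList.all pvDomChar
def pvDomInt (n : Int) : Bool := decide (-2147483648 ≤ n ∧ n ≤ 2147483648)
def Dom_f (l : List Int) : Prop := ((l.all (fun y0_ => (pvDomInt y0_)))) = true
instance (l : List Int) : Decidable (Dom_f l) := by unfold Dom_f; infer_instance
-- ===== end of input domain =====

-- B replaces A's increment/decrement loop by sort + binary search for the boundary
-- between non-positives and positives; objective: alternative (not faster).
-- ===== PORT A =====
def f (l : List Int) : Int :=
  let st := l.foldl (fun (ab : Int × Int) i =>
    if i > 0 then (ab.1 + 1, ab.2) else (ab.1 - 1, ab.2)) (0, 0)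
  st.1 + st.2

-- ===== PORT B =====
-- termination facts for the while loop, cited by the port below
theorem pvMidLtHi (lo hi : Int) (h : lo < hi) :
    PySem.Int.floordiv (lo + hi) 2 < hi := by
  rw [PySem.Int.floordiv_lt_iff_lt_mul (by omega : (0:Int) < 2)]; omega

theorem pvLoLeMid (lo hi : Int) (h : lo < hi) :
    lo ≤ PySem.Int.floordiv (lo + hi) 2 :=
  (PySem.Int.floordiv_two_mid_bounds (le_of_lt h)).1

-- the while loop of Source B: returns the final lo
def bsearch (s : List Int) (lo hi : Int) : Int :=
  if h : lo < hi then
    let mid := PySem.Int.floordiv (lo + hi) 2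
    if 0 < (PySem.List.pyGet? s mid).getD 0 then bsearch s lo mid
    else bsearch s (mid + 1) hi
  else lo
termination_by (hi - lo).toNat
decreasing_by
  · have h1 := pvMidLtHi lo hi h
    have h2 := pvLoLeMid lo hi h
    omega
  · have h1 := pvMidLtHi lo hi h
    have h2 := pvLoLeMid lo hi h
    omega

def f_alt (l : List Int) : Int :=
  let s := PySem.List.sorted l (fun x => x) false
  let lo := bsearch s 0 (s.length : Int)
  ((s.length : Int) - lo) - lo

-- ===== PRECONDITION & SPEC =====
def Spec_f (l : List Int) (out : Int) : Prop := out = f_alt l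
instance (l : List Int) (out : Int) : Decidable (Spec_f l out) := by unfold Spec_f; infer_instance

-- ===== CLAIM (what is proved, stated in full; the proofs are below) =====
def Claim_equal_f : Prop := ∀ (l : List Int), Dom_f l → Spec_f l (f l)

-- ===== LEMMAS AND PROOFS =====

-- A's fold computes 2·(count of positives) − length
theorem f_aux (l : List Int) (a b : Int) :
    (l.foldl (fun (ab : Int × Int) i =>
      if i > 0 then (ab.1 + 1, ab.2) else (ab.1 - 1, ab.2)) (a, b)).1 + (l.foldl (fun (ab : Int × Int) i =>
      if i > 0 then (ab.1 + 1, ab.2) else (ab.1 - 1, ab.2)) (a, b)).2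
    = a + b + 2 * ((l.filter (fun x => 0 < x)).length : Int) - l.length := by
  induction l generalizing a b with
  | nil => simp
  | cons x xs ih =>
    by_cases h : x > 0
    · simp [h, ih]; push_cast; ring
    · simp [h, ih]; push_cast; ring

-- the binary search finds the number of non-positive elements of a sorted list
theorem bsearch_spec (s : List Int) (lo hi : Int)
    (hs : s.Pairwise (· ≤ ·))
    (h0 : 0 ≤ lo) (hlh : lo ≤ hi) (hh : hi ≤ (s.length : Int))
    (hlow : ∀ i : Nat, (i : Int) < lo → ∀ hi' : i < s.length, s[i] ≤ 0)
    (hhigh : ∀ i : Nat, hi ≤ (i : Int) → ∀ hi' : i < s.length, 0 < s[i]) :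
    bsearch s lo hi = ((s.filter (fun x => x ≤ 0)).length : Int) := by
  rw [bsearch]
  by_cases h : lo < hi
  · simp only [h, dif_pos]
    set mid := PySem.Int.floordiv (lo + hi) 2 with hmid
    have h1 := pvMidLtHi lo hi h
    have h2 := pvLoLeMid lo hi h
    have hmr : mid.toNat < s.length := by omega
    have hget : (PySem.List.pyGet? s mid).getD 0 = s[mid.toNat] := by
      have hcast : mid = ((mid.toNat : Nat) : Int) := by omega
      conv_lhs => rw [hcast, PySem.List.pyGet?_natCast]
      simp [List.getElem?_eq_getElem hmr]
    have hpw := List.pairwise_iff_getElem.mp hs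
    by_cases hp : 0 < (PySem.List.pyGet? s mid).getD 0
    · simp only [hp, if_pos]
      apply bsearch_spec s lo mid hs h0 h2 (by omega) hlow
      intro i hge hi'
      rcases eq_or_lt_of_le (by omega : mid.toNat ≤ i) with heq | hlt
      · subst heq; rw [hget] at hp; exact hp
      · have := hpw mid.toNat i hmr hi' hlt
        rw [hget] at hp; omega
    · simp only [hp, if_neg]
      apply bsearch_spec s (mid + 1) hi hs (by omega) (by omega) hh
      · intro i hlt hi'
        rw [hget] at hp
        rcases eq_or_lt_of_le (by omega : i ≤ mid.toNat) with heq | hlt2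
        · subst heq; omega
        · have := hpw i mid.toNat hi' hmr hlt2
          omega
      · exact hhigh
  · simp only [h, dif_neg, not_false_iff]
    have hle : hi ≤ lo := le_of_not_gt h
    have heq : lo = hi := le_antisymm hlh hle
    -- s splits at lo.toNat: everything before satisfies ≤ 0, everything after doesn't
    have hk : lo.toNat ≤ s.length := by omega
    have : (s.filter (fun x => x ≤ 0)).length = lo.toNat := by
      conv_lhs => rw [← List.take_append_drop lo.toNat s]
      rw [List.filter_append]
      have ht : (s.take lo.toNat).filter (fun x => x ≤ 0) = s.take lo.toNat := by
        apply List.filter_eq_self.mpr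
        intro x hx
        rcases List.mem_iff_getElem.mp hx with ⟨j, hj, hxe⟩
        have hj' : j < lo.toNat ∧ j < s.length := by
          simp [List.length_take] at hj; omega
        have : s[j] = x := by rw [← hxe]; simp [List.getElem_take]
        have := hlow j (by omega) hj'.2
        simp; omega
      have hd : (s.drop lo.toNat).filter (fun x => x ≤ 0) = [] := by
        apply List.filter_eq_nil_iff.mpr
        intro x hx
        rcases List.mem_iff_getElem.mp hx with ⟨j, hj, hxe⟩
        have hjlen : lo.toNat + j < s.length := by simp at hj; omega
        have : s[lo.toNat + j] = x := by rw [← hxe]; simp [List.getElem_drop]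
        have := hhigh (lo.toNat + j) (by rw [← heq]; push_cast; omega) hjlen
        simp; omega
      rw [ht, hd]
      simp; omega
    omega
termination_by (hi - lo).toNat
decreasing_by
  · have h1 := pvMidLtHi lo hi h
    have h2 := pvLoLeMid lo hi h
    omega
  · have h1 := pvMidLtHi lo hi h
    have h2 := pvLoLeMid lo hi h
    omega

theorem filter_split (l : List Int) :
    (l.filter (fun x => 0 < x)).length + (l.filter (fun x => x ≤ 0)).length = l.length := by
  induction l with
  | nil => simp
  | cons x xs ih =>
    by_cases h : 0 < x
    · simp [h, List.filter_cons]; omega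
    · simp [h, List.filter_cons, (by omega : x ≤ 0)]; omega

-- ===== VERDICT (by name: the statement is the Claim_ definition above) =====
theorem f_spec : Claim_equal_f := by
  intro l _
  unfold Spec_f f f_alt
  dsimp only
  set s := PySem.List.sorted l (fun x => x) false with hsdef
  have hperm : s.Perm l := PySem.List.sorted_perm l (fun x => x) false
  have hpw : s.Pairwise (· ≤ ·) := by
    simpa using PySem.List.sorted_pairwise l (fun x => x)
  have hb := bsearch_spec s 0 (s.length : Int) hpw le_rfl (by positivity) le_rfl
    (by intro i h _; omega)
    (by intro i h hi'; omega)
  rw [hb]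
  have hc1 : (s.filter (fun x => x ≤ 0)).length = (l.filter (fun x => x ≤ 0)).length := by
    have := hperm.countP_eq (fun x => decide (x ≤ 0))
    simpa [List.countP_eq_length_filter] using this
  have hc2 := filter_split l
  have hlen : s.length = l.length := hperm.length_eq
  have ha := f_aux l 0 0
  rw [ha, hlen, hc1]
  push_cast
  omega
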